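-- pv_equiv track=rewrite | github.com/TheAlgorithms/Python | project_euler/problem_109/sol1.py | solution
-- ===== SOURCE A (Python) =====
-- from itertools import combinations_with_replacement
--
-- def solution(limit: int = 100) -> int:
--     """
--     Count the number of distinct ways a player can checkout with a score
--     less than limit.
--     >>> solution(171)
--     42336
--     >>> solution(50)
--     12577
--     """
--     singles: list[int] = [x for x in range(1, 21)] + [25]
--     doubles: list[int] = [2 * x for x in range(1, 21)] + [50]
--     triples: list[int] = [3 * x for x in range(1, 21)]
--     all_values: list[int] = singles + doubles + triples + [0]
--
--     num_checkouts: int = 0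
--     double: int
--     throw1: int
--     throw2: int
--     checkout_total: int
--
--     for double in doubles:
--         for throw1, throw2 in combinations_with_replacement(all_values, 2):
--             checkout_total = double + throw1 + throw2
--             if checkout_total < limit:
--                 num_checkouts += 1
--
--     return num_checkouts
-- ===== SOURCE B (Python) =====
-- from bisect import bisect_left
--
--
-- def solution(limit: int = 100) -> int:
--     """
--     Count the number of distinct ways a player can checkout with a score
--     less than limit.
--
--     Counting identity: the number of unordered-with-replacement pairs of
--     throws (over the value list with multiplicity) whose sum is below t
--     equals (ordered pairs below t + diagonal pairs below t) / 2.  The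
--     ordered count is obtained by one bisect per first throw on the sorted
--     value list, so no pair enumeration is ever materialised.
--     """
--     doubles: list[int] = [2 * x for x in range(1, 21)] + [50]
--     vals: list[int] = sorted(
--         list(range(1, 21)) + [25]
--         + doubles
--         + [3 * x for x in range(1, 21)]
--         + [0]
--     )
--
--     total: int = 0
--     for double in doubles:
--         t = limit - double
--         ordered = sum(bisect_left(vals, t - a) for a in vals)
--         diagonal = sum(1 for a in vals if 2 * a < t)
--         total += (ordered + diagonal) // 2
--     return total
-- ===== Notes on version B (the rewrite author's own statement) =====
-- stated objective: faster
-- what changed: B never enumerates pairs of throws: it sorts the throw-value list once and, per double, counts ordered pairs below the threshold with one bisect_left per first throw plus a diagonal count, then halves their sum via the unordered-with-replacement pair identity.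
import Mathlib
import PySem

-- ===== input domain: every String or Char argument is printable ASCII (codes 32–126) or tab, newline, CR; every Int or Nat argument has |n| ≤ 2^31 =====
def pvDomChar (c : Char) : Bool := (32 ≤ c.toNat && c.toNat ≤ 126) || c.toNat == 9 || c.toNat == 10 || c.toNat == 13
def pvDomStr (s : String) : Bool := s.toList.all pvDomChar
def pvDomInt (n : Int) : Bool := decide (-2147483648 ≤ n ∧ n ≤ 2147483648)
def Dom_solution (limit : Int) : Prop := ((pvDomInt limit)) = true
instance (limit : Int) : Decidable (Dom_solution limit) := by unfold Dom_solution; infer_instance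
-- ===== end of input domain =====

-- B never enumerates pairs: it sorts the throw values once and counts, per double, ordered
-- pairs below the threshold via bisect_left plus a diagonal count, halving their sum
-- (2 * unordered-with-replacement = ordered + diagonal); return value proved identical.

-- itertools.combinations_with_replacement(xs, 2): pairs (xs[i], xs[j]) with i ≤ j, in order
-- (used by Python A; exact for r = 2)
def cwr2 : List Int → List (Int × Int)
  | [] => []
  | x :: rest => (x :: rest).map (fun y => (x, y)) ++ cwr2 rest

-- ===== PORT A =====
def solution (limit : Int) : Int :=
  let singles : List Int := PySem.List.pyRange 1 21 1 ++ [25]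
  let doubles : List Int := (PySem.List.pyRange 1 21 1).map (fun x => 2 * x) ++ [50]
  let triples : List Int := (PySem.List.pyRange 1 21 1).map (fun x => 3 * x)
  let allValues : List Int := singles ++ doubles ++ triples ++ [0]
  doubles.foldl (fun numCheckouts d =>
    (cwr2 allValues).foldl (fun acc p =>
      let checkoutTotal := d + p.1 + p.2
      if checkoutTotal < limit then acc + 1 else acc) numCheckouts) 0

-- ===== PORT B =====
def solution_alt (limit : Int) : Int :=
  let doubles : List Int := (PySem.List.pyRange 1 21 1).map (fun x => 2 * x) ++ [50]
  let vals : List Int :=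
    PySem.List.sorted
      (PySem.List.pyRange 1 21 1 ++ [25] ++ doubles ++
        (PySem.List.pyRange 1 21 1).map (fun x => 3 * x) ++ [0])
      (fun s => s) false
  doubles.foldl (fun total d =>
    let t := limit - d
    let ordered : Int := (vals.map (fun a => (PySem.List.bisectLeft vals (t - a) : Int))).sum
    let diagonal : Int := (vals.countP (fun a => decide (2 * a < t)) : Int)
    total + PySem.Int.floordiv (ordered + diagonal) 2) 0

-- ===== PRECONDITION & SPEC =====
def Spec_solution (limit : Int) (out : Int) : Prop := out = solution_alt limit
instance (limit : Int) (out : Int) : Decidable (Spec_solution limit out) := by unfold Spec_solution; infer_instance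

-- ===== CLAIM (what is proved, stated in full; the proofs are below) =====
def Claim_equal_solution : Prop := ∀ (limit : Int), Dom_solution limit → Spec_solution limit (solution limit)

-- ===== LEMMAS AND PROOFS =====

-- On a (≤)-sorted list, bisect_left x is exactly the number of elements < x.
theorem bisectLeft_eq_countP (xs : List Int) (x : Int)
    (h : xs.Pairwise (fun a b => a ≤ b)) :
    PySem.List.bisectLeft xs x = xs.countP (fun a => decide (a < x)) := by
  obtain ⟨hle, hlt, hge⟩ := PySem.List.bisectLeft_spec xs x h
  set k := PySem.List.bisectLeft xs x with hk
  have hsplit : xs = xs.take k ++ xs.drop k := (List.take_append_drop k xs).symm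
  have h1 : (xs.take k).countP (fun a => decide (a < x)) = k := by
    have : ∀ a ∈ xs.take k, (fun a => decide (a < x)) a = true := by
      intro a ha
      obtain ⟨j, hj, hja⟩ := List.getElem_of_mem ha
      have hjlen : j < xs.length := lt_of_lt_of_le hj (by simp [List.length_take])
      have hjk : j < k := lt_of_lt_of_le hj (by simp [List.length_take])
      have := hlt j hjlen hjk
      simp only [List.getElem_take] at hja
      simpa [← hja] using this
    rw [List.countP_eq_length.2 this, List.length_take]
    omega
  have h2 : (xs.drop k).countP (fun a => decide (a < x)) = 0 := by
    apply List.countP_eq_zero.2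
    intro a ha
    obtain ⟨j, hj, hja⟩ := List.getElem_of_mem ha
    have hjlen : k + j < xs.length := by
      have := hj; simp [List.length_drop] at this; omega
    have := hge (k + j) hjlen (Nat.le_add_right k j)
    simp only [List.getElem_drop] at hja
    simp [← hja]
    omega
  have hc : xs.countP (fun a => decide (a < x)) = k := by
    conv_lhs => rw [hsplit]
    rw [List.countP_append, h1, h2]
    omega
  exact hc.symm

-- The half-pair identity: twice the unordered-with-replacement count equals the
-- ordered count plus the diagonal count.
theorem sum_map_ite_eq_countP (p : Int → Bool) (l : List Int) :
    (l.map (fun a => if p a = true then (1 : Nat) else 0)).sum = l.countP p := by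
  induction l with
  | nil => simp
  | cons x r ih => simp [List.countP_cons, ih]; split <;> omega

theorem two_mul_cwr2_countP (xs : List Int) (t : Int) :
    2 * (cwr2 xs).countP (fun p => decide (p.1 + p.2 < t))
      = (xs.map (fun a => xs.countP (fun b => decide (a + b < t)))).sum
        + xs.countP (fun a => decide (2 * a < t)) := by
  induction xs with
  | nil => simp [cwr2]
  | cons x r ih =>
    have hswap : r.countP (fun b => decide (b + x < t)) = r.countP (fun b => decide (x + b < t)) := by
      apply List.countP_congr; intro b _
      constructor <;> intro h <;> simp_all <;> omega
    have hL : (cwr2 (x :: r)).countP (fun p => decide (p.1 + p.2 < t))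
        = (x :: r).countP (fun b => decide (x + b < t))
          + (cwr2 r).countP (fun p => decide (p.1 + p.2 < t)) := by
      have hc : List.countP ((fun p : Int × Int => decide (p.1 + p.2 < t)) ∘ fun y => (x, y)) r
          = r.countP (fun b => decide (x + b < t)) := by
        apply List.countP_congr; intro b _; simp [Function.comp]
      simp [cwr2, List.countP_cons, List.countP_append, List.countP_map, hc]
      omega
    have hmapeq : (x :: r).map (fun a => (x :: r).countP (fun b => decide (a + b < t)))
        = (x :: r).map (fun a =>
            (if (decide (a + x < t)) = true then (1 : Nat) else 0)
              + r.countP (fun b => decide (a + b < t))) := by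
      apply List.map_congr_left
      intro a _
      rw [List.countP_cons]
      omega
    have hsum : ((x :: r).map (fun a => (x :: r).countP (fun b => decide (a + b < t)))).sum
        = (x :: r).countP (fun a => decide (a + x < t))
          + ((x :: r).map (fun a => r.countP (fun b => decide (a + b < t)))).sum := by
      rw [hmapeq, List.sum_map_add, sum_map_ite_eq_countP]
    have hcx : (x :: r).countP (fun a => decide (a + x < t))
        = r.countP (fun a => decide (a + x < t)) + (if decide (x + x < t) = true then 1 else 0) :=
      List.countP_cons
    have hm2 : ((x :: r).map (fun a => r.countP (fun b => decide (a + b < t)))).sum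
        = r.countP (fun b => decide (x + b < t))
          + (r.map (fun a => r.countP (fun b => decide (a + b < t)))).sum := by
      simp
    have hLc : (x :: r).countP (fun b => decide (x + b < t))
        = r.countP (fun b => decide (x + b < t)) + (if decide (x + x < t) = true then 1 else 0) :=
      List.countP_cons
    have hdiag : (x :: r).countP (fun a => decide (2 * a < t))
        = r.countP (fun a => decide (2 * a < t)) + (if decide (2 * x < t) = true then 1 else 0) :=
      List.countP_cons
    have hiff : (if decide (2 * x < t) = true then (1:Nat) else 0)
        = (if decide (x + x < t) = true then (1:Nat) else 0) := by
      by_cases h : x + x < t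
      · have : 2 * x < t := by omega
        simp [h, this]
      · have : ¬ (2 * x < t) := by omega
        simp [h, this]
    rw [hL, hsum, hm2, hcx, hLc, hdiag, hiff]
    omega

-- A's inner scan over the pairs, as a countP.
theorem inner_scan (limit d : Int) (xs : List Int) (n : Int) :
    (cwr2 xs).foldl (fun acc p =>
        if d + p.1 + p.2 < limit then acc + 1 else acc) n
      = n + ((cwr2 xs).countP (fun p => decide (p.1 + p.2 < limit - d)) : Int) := by
  rw [PySem.List.foldl_ite_add_one]
  congr 2
  apply List.countP_congr
  intro p _
  constructor <;> intro h <;> simp_all <;> omega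

-- Per double: A's pair count equals B's halved (ordered + diagonal) over the sorted values.
theorem per_double (limit d : Int) (xs : List Int) :
    ((cwr2 xs).countP (fun p => decide (p.1 + p.2 < limit - d)) : Int)
      = PySem.Int.floordiv
          (((PySem.List.sorted xs (fun s => s) false).map
              (fun a => (PySem.List.bisectLeft (PySem.List.sorted xs (fun s => s) false)
                (limit - d - a) : Int))).sum
            + ((PySem.List.sorted xs (fun s => s) false).countP
                (fun a => decide (2 * a < limit - d)) : Int))
          2 := by
  set vals := PySem.List.sorted xs (fun s => s) false with hv
  have hperm : vals.Perm xs := PySem.List.sorted_perm xs (fun s => s) false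
  have hsorted : vals.Pairwise (fun a b => a ≤ b) := by
    simpa using PySem.List.sorted_pairwise xs (fun s => s)
  have hbis : ∀ a : Int, (PySem.List.bisectLeft vals (limit - d - a) : Int)
      = (xs.countP (fun b => decide (a + b < limit - d)) : Int) := by
    intro a
    rw [bisectLeft_eq_countP vals _ hsorted]
    refine congrArg Nat.cast ?_
    rw [hperm.countP_eq]
    apply List.countP_congr
    intro b _
    constructor <;> intro h <;> simp_all <;> omega
  have hmap : (vals.map (fun a => (PySem.List.bisectLeft vals (limit - d - a) : Int))).sum
      = ((xs.map (fun a => xs.countP (fun b => decide (a + b < limit - d)))).sum : Int) := by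
    have h1 : vals.map (fun a => (PySem.List.bisectLeft vals (limit - d - a) : Int))
        = vals.map (fun a => (xs.countP (fun b => decide (a + b < limit - d)) : Int)) :=
      List.map_congr_left (fun a _ => hbis a)
    rw [h1]
    have h2 : (vals.map (fun a => (xs.countP (fun b => decide (a + b < limit - d)) : Int))).Perm
        (xs.map (fun a => (xs.countP (fun b => decide (a + b < limit - d)) : Int))) :=
      hperm.map _
    rw [h2.sum_eq, Nat.cast_list_sum, List.map_map]
    rfl
  have hdiag : (vals.countP (fun a => decide (2 * a < limit - d)) : Int)
      = (xs.countP (fun a => decide (2 * a < limit - d)) : Int) := by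
    rw [hperm.countP_eq]
  rw [hmap, hdiag]
  have hkey := two_mul_cwr2_countP xs (limit - d)
  have hkeyZ : ((xs.map (fun a => xs.countP (fun b => decide (a + b < limit - d)))).sum : Int)
      + (xs.countP (fun a => decide (2 * a < limit - d)) : Int)
      = 2 * ((cwr2 xs).countP (fun p => decide (p.1 + p.2 < limit - d)) : Int) := by
    have := congrArg (fun n : Nat => (n : Int)) hkey
    simp only [Nat.cast_mul, Nat.cast_add, Nat.cast_ofNat, Nat.cast_list_sum, List.map_map] at this
    rw [Nat.cast_list_sum, List.map_map]
    exact this.symm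
  rw [hkeyZ]
  rw [PySem.Int.floordiv_eq_ediv_of_pos (by omega : (0:Int) < 2)]
  omega

-- ===== VERDICT (by name: the statement is the Claim_ definition above) =====
set_option maxRecDepth 8192 in
theorem solution_spec : Claim_equal_solution := by
  intro limit _
  unfold Spec_solution solution solution_alt
  simp only
  set doubles : List Int := (PySem.List.pyRange 1 21 1).map (fun x => 2 * x) ++ [50] with hd
  set allValues : List Int := PySem.List.pyRange 1 21 1 ++ [25] ++ doubles ++
    (PySem.List.pyRange 1 21 1).map (fun x => 3 * x) ++ [0] with ha
  have hA : ∀ (l : List Int) (n : Int),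
      l.foldl (fun numCheckouts d =>
        (cwr2 allValues).foldl (fun acc p =>
          if d + p.1 + p.2 < limit then acc + 1 else acc) numCheckouts) n
      = l.foldl (fun total d =>
          total + PySem.Int.floordiv
            (((PySem.List.sorted allValues (fun s => s) false).map
                (fun a => (PySem.List.bisectLeft (PySem.List.sorted allValues (fun s => s) false)
                  (limit - d - a) : Int))).sum
              + ((PySem.List.sorted allValues (fun s => s) false).countP
                  (fun a => decide (2 * a < limit - d)) : Int))
            2) n := by
    intro l
    induction l with
    | nil => intro n; rfl
    | cons x r ih =>
      intro n
      simp only [List.foldl_cons]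
      rw [inner_scan, per_double limit x allValues, ih]
  exact hA doubles 0
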